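-- pv_equiv track=rewrite | github.com/kim-min-ju449/Cos-pro | practice1.py | solution
-- ===== SOURCE A (Python) =====
-- def solution(left_rings):
--     answer = 0
--     for i in range(len(left_rings)):
--         if left_rings[i] <= i:
--             for k in range(0, i):
--                 if left_rings[k] > left_rings[i]:
--                     answer += 1
--     return answer
-- ===== SOURCE B (Python) =====
-- def _bisect_right(xs, v):
--     # standard binary search: first index whose element is > v (xs sorted ascending)
--     lo, hi = 0, len(xs)
--     while lo < hi:
--         mid = (lo + hi) // 2
--         if v < xs[mid]:
--             hi = mid
--         else:
--             lo = mid + 1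
--     return lo
--
--
-- def solution(left_rings):
--     # one left-to-right pass keeping the already-seen prefix in a sorted list;
--     # the number of earlier elements greater than v is len(seen) - bisect_right(seen, v)
--     seen = []
--     answer = 0
--     for i, v in enumerate(left_rings):
--         pos = _bisect_right(seen, v)
--         if v <= i:
--             answer += len(seen) - pos
--         seen.insert(pos, v)
--     return answer
-- ===== Notes on version B (the rewrite author's own statement) =====
-- stated objective: faster
-- what changed: Replaces the nested index scan by a single left-to-right pass that keeps the already-seen prefix as a sorted list and gets the greater-count for each qualifying index by binary search (bisect_right), inserting each element at its sorted position.
import Mathlib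
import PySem

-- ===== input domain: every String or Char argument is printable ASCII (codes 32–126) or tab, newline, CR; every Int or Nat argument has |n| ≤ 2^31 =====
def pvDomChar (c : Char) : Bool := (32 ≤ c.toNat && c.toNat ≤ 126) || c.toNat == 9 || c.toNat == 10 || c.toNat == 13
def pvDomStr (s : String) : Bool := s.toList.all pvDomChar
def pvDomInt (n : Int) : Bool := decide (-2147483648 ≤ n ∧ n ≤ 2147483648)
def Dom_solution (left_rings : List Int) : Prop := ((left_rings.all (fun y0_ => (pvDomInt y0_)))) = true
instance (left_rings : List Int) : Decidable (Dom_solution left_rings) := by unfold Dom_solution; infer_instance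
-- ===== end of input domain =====

-- B replaces A's nested index scan by a single pass that keeps the already-seen prefix in a
-- sorted list and answers each greater-count query by binary search (measured faster).

-- ===== PORT A =====
-- literal transliteration of A's nested loops; every index produced by range(...) is in
-- range, so left_rings[i] is pyGetD at an in-range index (exact there)
def solution (left_rings : List Int) : Int :=
  (PySem.List.pyRange 0 (left_rings.length : Int)).foldl (fun answer i =>
    if PySem.List.pyGetD left_rings i 0 ≤ i then
      (PySem.List.pyRange 0 i).foldl (fun answer2 k =>
        if PySem.List.pyGetD left_rings k 0 > PySem.List.pyGetD left_rings i 0 then answer2 + 1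
        else answer2) answer
    else answer) 0

-- ===== PORT B =====
-- Source B's _bisect_right is CPython's bisect.bisect_right loop, whose PySem primitive is
-- PySem.List.bisectRight; seen.insert(pos, v) is PySem.List.insert (exact: 0 ≤ pos ≤ len)
def solAltLoop : List Int → Nat → List Int → Int → Int
  | [], _, _, answer => answer
  | v :: rest, i, seen, answer =>
    let pos := PySem.List.bisectRight seen v
    let answer' := if v ≤ (i : Int) then answer + ((seen.length : Int) - (pos : Int)) else answer
    solAltLoop rest (i + 1) (PySem.List.insert seen (pos : Int) v) answer'

def solution_alt (left_rings : List Int) : Int :=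
  solAltLoop left_rings 0 [] 0

-- ===== PRECONDITION & SPEC =====
def Spec_solution (left_rings : List Int) (out : Int) : Prop := out = solution_alt left_rings
instance (left_rings : List Int) (out : Int) : Decidable (Spec_solution left_rings out) := by unfold Spec_solution; infer_instance

-- ===== CLAIM (what is proved, stated in full; the proofs are below) =====
def Claim_equal_solution : Prop := ∀ (left_rings : List Int), Dom_solution left_rings → Spec_solution left_rings (solution left_rings)

-- ===== LEMMAS AND PROOFS =====

-- the value both programs add for index i: if a[i] ≤ i, the number of earlier elements greater than a[i]
def pvTerm (a : List Int) (i : Nat) : Int :=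
  if a.getD i 0 ≤ (i : Int) then ((a.take i).countP (fun x => decide (a.getD i 0 < x)) : Int) else 0

-- reference recursion: remaining suffix, current index, already-seen prefix (in original order)
def pvLoop : List Int → Nat → List Int → Int
  | [], _, _ => 0
  | v :: rest, i, pre =>
    (if v ≤ (i : Int) then ((pre.countP (fun x => decide (v < x))) : Int) else 0)
      + pvLoop rest (i + 1) (pre ++ [v])

lemma pv_countP_range (a : List Int) (i : Nat) (h : i ≤ a.length)
    (q : Int → Prop) [DecidablePred q] :
    (List.range i).countP (fun k => decide (q (a.getD k 0))) = (a.take i).countP (fun x => decide (q x)) := by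
  have hmap : (List.range i).map (fun k => a.getD k 0) = a.take i := by
    apply List.ext_getElem
    · simp [h]
    · intro j hj hj'
      simp only [List.getElem_map, List.getElem_range, List.getElem_take]
      have hjl : j < a.length := by
        have := hj'; simp only [List.length_take] at this; omega
      simp [List.getD_eq_getElem?_getD, List.getElem?_eq_getElem hjl]
  rw [← hmap, List.countP_map]
  rfl

lemma solution_eq_sum (a : List Int) :
    solution a = ((List.range a.length).map (pvTerm a)).sum := by
  unfold solution
  rw [PySem.List.pyRange_zero_natCast, List.foldl_map]
  refine (PySem.List.foldl_congr_mem _ _ (fun acc i => acc + pvTerm a i) _ ?_).trans ?_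
  · intro acc i hi
    beta_reduce
    have hil : i < a.length := List.mem_range.mp hi
    rw [PySem.List.pyGetD_natCast]
    unfold pvTerm
    by_cases hc : a.getD i 0 ≤ (i : Int)
    · rw [if_pos hc, if_pos hc]
      rw [PySem.List.pyRange_zero_natCast, List.foldl_map]
      rw [PySem.List.foldl_ite_add_one
        (p := fun k : Nat => PySem.List.pyGetD a (k : Int) 0 > a.getD i 0)]
      congr 1
      rw [List.countP_congr (q := fun k => decide (a.getD i 0 < a.getD k 0))
        (by intro k _; simp [PySem.List.pyGetD_natCast])]
      exact congrArg _ (pv_countP_range a i (le_of_lt hil) (fun x => a.getD i 0 < x))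
    · rw [if_neg hc, if_neg hc]
      ring
  · rw [PySem.List.foldl_add]
    ring

lemma pvLoop_eq_sum (a : List Int) (k : Nat) :
    pvLoop (a.drop k) k (a.take k) = ((List.range' k (a.length - k)).map (pvTerm a)).sum := by
  induction hd : a.drop k generalizing k with
  | nil =>
    have hlk : a.length ≤ k := List.drop_eq_nil_iff.mp hd
    simp [pvLoop, Nat.sub_eq_zero_of_le hlk]
  | cons v rest ih =>
    have hk : k < a.length := by
      by_contra h
      rw [List.drop_eq_nil_iff.mpr (by omega)] at hd
      exact List.cons_ne_nil v rest hd.symm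
    have hv : a[k] = v := by
      have h0 : (a.drop k)[0]'(by simp [hd]) = v := by simp [hd]
      rwa [List.getElem_drop] at h0
    have hgetD : a.getD k 0 = v := by
      rw [List.getD_eq_getElem?_getD, List.getElem?_eq_getElem hk, hv]; rfl
    have htake : a.take (k + 1) = a.take k ++ [v] := by
      rw [List.take_add_one, List.getElem?_eq_getElem hk, hv]; rfl
    have hdrop : a.drop (k + 1) = rest := by
      have h1 : a.drop (k + 1) = (a.drop k).drop 1 := by rw [List.drop_drop]
      simp [h1, hd]
    have hlen : a.length - k = (a.length - (k + 1)) + 1 := by omega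
    rw [hlen, List.range'_succ]
    simp only [pvLoop, List.map_cons, List.sum_cons]
    rw [← htake, ih (k + 1) hdrop]
    unfold pvTerm
    rw [hgetD]
lemma pv_countP_of_sorted (seen : List Int) (v : Int)
    (hs : List.Pairwise (· ≤ ·) seen) :
    seen.countP (fun x => decide (v < x)) = seen.length - PySem.List.bisectRight seen v := by
  obtain ⟨hle, hlo, hhi⟩ := PySem.List.bisectRight_spec seen v hs
  have h1 : (seen.take (PySem.List.bisectRight seen v)).countP (fun x => decide (v < x)) = 0 := by
    rw [List.countP_eq_zero]
    intro x hx
    obtain ⟨j, hj, hxj⟩ := List.mem_iff_getElem.mp hx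
    have hjp : j < PySem.List.bisectRight seen v := by
      simp only [List.length_take] at hj; omega
    have hjl : j < seen.length := by omega
    have hle' := hlo j hjl hjp
    rw [List.getElem_take] at hxj
    simp only [← hxj, decide_eq_true_eq, not_lt]
    omega
  have h2 : (seen.drop (PySem.List.bisectRight seen v)).countP (fun x => decide (v < x))
      = (seen.drop (PySem.List.bisectRight seen v)).length := by
    rw [List.countP_eq_length]
    intro x hx
    obtain ⟨j, hj, hxj⟩ := List.mem_iff_getElem.mp hx
    rw [List.getElem_drop] at hxj
    have hjl : PySem.List.bisectRight seen v + j < seen.length := by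
      simp only [List.length_drop] at hj; omega
    have hlt := hhi (PySem.List.bisectRight seen v + j) hjl (by omega)
    simp only [← hxj, decide_eq_true_eq]
    omega
  calc seen.countP (fun x => decide (v < x))
      = ((seen.take (PySem.List.bisectRight seen v))
          ++ (seen.drop (PySem.List.bisectRight seen v))).countP (fun x => decide (v < x)) := by
        rw [List.take_append_drop]
    _ = seen.length - PySem.List.bisectRight seen v := by
        rw [List.countP_append, h1, h2, List.length_drop]
        omega

lemma pv_insert_sorted (seen : List Int) (v : Int)
    (hs : List.Pairwise (· ≤ ·) seen) :
    List.Pairwise (· ≤ ·)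
      (seen.take (PySem.List.bisectRight seen v) ++ v :: seen.drop (PySem.List.bisectRight seen v)) := by
  obtain ⟨hle, hlo, hhi⟩ := PySem.List.bisectRight_spec seen v hs
  have h_take : ∀ x ∈ seen.take (PySem.List.bisectRight seen v), x ≤ v := by
    intro x hx
    obtain ⟨j, hj, hxj⟩ := List.mem_iff_getElem.mp hx
    have hjp : j < PySem.List.bisectRight seen v := by
      simp only [List.length_take] at hj; omega
    have hjl : j < seen.length := by omega
    rw [List.getElem_take] at hxj
    exact hxj ▸ hlo j hjl hjp
  have h_drop : ∀ y ∈ seen.drop (PySem.List.bisectRight seen v), v < y := by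
    intro y hy
    obtain ⟨j, hj, hyj⟩ := List.mem_iff_getElem.mp hy
    rw [List.getElem_drop] at hyj
    have hjl : PySem.List.bisectRight seen v + j < seen.length := by
      simp only [List.length_drop] at hj; omega
    exact hyj ▸ hhi (PySem.List.bisectRight seen v + j) hjl (by omega)
  rw [List.pairwise_append]
  refine ⟨hs.sublist (List.take_sublist _ _), ?_, ?_⟩
  · rw [List.pairwise_cons]
    exact ⟨fun y hy => le_of_lt (h_drop y hy), hs.sublist (List.drop_sublist _ _)⟩
  · intro x hx y hy
    rcases List.mem_cons.mp hy with rfl | hy'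
    · exact h_take x hx
    · exact le_of_lt (lt_of_le_of_lt (h_take x hx) (h_drop y hy'))

lemma solAltLoop_eq_pvLoop :
    ∀ (l : List Int) (i : Nat) (seen pre : List Int) (answer : Int),
      seen.Perm pre → List.Pairwise (· ≤ ·) seen →
      solAltLoop l i seen answer = answer + pvLoop l i pre := by
  intro l
  induction l with
  | nil => intro i seen pre answer _ _; simp [solAltLoop, pvLoop]
  | cons v rest ih =>
    intro i seen pre answer hperm hs
    obtain ⟨hle, hlo, hhi⟩ := PySem.List.bisectRight_spec seen v hs
    have hins : PySem.List.insert seen ((PySem.List.bisectRight seen v : Nat) : Int) v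
        = seen.take (PySem.List.bisectRight seen v) ++ v :: seen.drop (PySem.List.bisectRight seen v) :=
      PySem.List.insert_natCast seen _ v hle
    have hcount : ((pre.countP (fun x => decide (v < x))) : Int)
        = (seen.length : Int) - ((PySem.List.bisectRight seen v : Nat) : Int) := by
      rw [← hperm.countP_eq, pv_countP_of_sorted seen v hs, Nat.cast_sub hle]
    have hperm' : (seen.take (PySem.List.bisectRight seen v)
        ++ v :: seen.drop (PySem.List.bisectRight seen v)).Perm (pre ++ [v]) := by
      have h1 : (seen.take (PySem.List.bisectRight seen v)
          ++ v :: seen.drop (PySem.List.bisectRight seen v)).Perm (v :: seen) := by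
        have h2 := List.perm_middle (a := v)
          (l₁ := seen.take (PySem.List.bisectRight seen v))
          (l₂ := seen.drop (PySem.List.bisectRight seen v))
        rwa [List.take_append_drop] at h2
      exact h1.trans ((hperm.cons v).trans (List.perm_append_singleton v pre).symm)
    have hsort' := pv_insert_sorted seen v hs
    simp only [solAltLoop]
    rw [hins, ih (i + 1) _ (pre ++ [v]) _ hperm' hsort']
    simp only [pvLoop]
    rw [hcount]
    split_ifs with h
    · ring
    · ring

-- ===== VERDICT (by name: the statement is the Claim_ definition above) =====
theorem solution_spec : Claim_equal_solution := by
  intro a _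
  unfold Spec_solution
  have hB : solution_alt a = pvLoop a 0 [] := by
    unfold solution_alt
    rw [solAltLoop_eq_pvLoop a 0 [] [] 0 (List.Perm.refl []) List.Pairwise.nil]
    ring
  have hA := pvLoop_eq_sum a 0
  simp only [List.drop_zero, List.take_zero, Nat.sub_zero] at hA
  rw [solution_eq_sum, hB, hA, List.range_eq_range']
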